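-- pv_equiv track=rewrite | github.com/Leonid-Nenkin/python-basics | hw5/task3.py | tuples_generator
-- ===== SOURCE A (Python) =====
-- def tuples_generator(tutors, klasses):
--     pos = 0
--
--     for _ in tutors:
--         if pos > (len(klasses) - 1):
--             current_class = None
--         else:
--            current_class = klasses[pos]
--
--         yield ((tutors[pos], current_class))
--         pos += 1
-- ===== SOURCE B (Python) =====
-- def tuples_generator(tutors, klasses):
--     padded = list(klasses) + [None] * (len(tutors) - len(klasses))
--     yield from zip(tutors, padded)
-- ===== Notes on version B (the rewrite author's own statement) =====
-- stated objective: idiomatic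
-- what changed: Replaced the index counter with a bounds-check branch by zipping tutors against the class list padded with None to tutors' length; zip truncation replaces positional indexing.
import Mathlib
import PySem

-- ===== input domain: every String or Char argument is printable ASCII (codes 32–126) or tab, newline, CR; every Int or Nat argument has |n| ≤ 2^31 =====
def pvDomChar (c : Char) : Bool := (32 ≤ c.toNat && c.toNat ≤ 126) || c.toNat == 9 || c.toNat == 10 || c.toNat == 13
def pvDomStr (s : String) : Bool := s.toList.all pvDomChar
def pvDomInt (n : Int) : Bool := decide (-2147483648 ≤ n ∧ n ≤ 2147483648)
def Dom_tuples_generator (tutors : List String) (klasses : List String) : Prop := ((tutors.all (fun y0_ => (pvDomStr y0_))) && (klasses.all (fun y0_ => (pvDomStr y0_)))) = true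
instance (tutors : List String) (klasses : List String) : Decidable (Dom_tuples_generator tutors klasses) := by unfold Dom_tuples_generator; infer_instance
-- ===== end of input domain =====

-- B pairs tutors with the None-padded class list via zip instead of A's index counter
-- with a bounds-check branch; same values, idiomatic restructuring (no speed claim).

-- ===== PORT A =====
-- A's loop: 'for _ in tutors' with a running index pos, indexing tutors[pos] and klasses[pos].
-- tutors[pos] is always in range (pos = iteration count), so .getD "" is never taken.
def tuples_generator_go (tutors klasses : List String) : Int → List String → List (String × Option String)
  | _, [] => []
  | pos, _ :: rest =>
      let current_class : Option String :=
        if pos > (klasses.length : Int) - 1 then none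
        else PySem.List.pyGet? klasses pos
      ((PySem.List.pyGet? tutors pos).getD "", current_class) ::
        tuples_generator_go tutors klasses (pos + 1) rest

def tuples_generator (tutors : List String) (klasses : List String) : List (String × Option String) :=
  tuples_generator_go tutors klasses 0 tutors

-- ===== PORT B =====
-- Source B: padded = list(klasses) + [None] * (len(tutors) - len(klasses)); yield from zip(tutors, padded)
def tuples_generator_alt (tutors : List String) (klasses : List String) : List (String × Option String) :=
  let padded : List (Option String) :=
    klasses.map some ++ List.replicate (tutors.length - klasses.length) none
  tutors.zip padded

-- ===== PRECONDITION & SPEC =====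
def Spec_tuples_generator (tutors : List String) (klasses : List String) (out : List (String × Option String)) : Prop := out = tuples_generator_alt tutors klasses
instance (tutors : List String) (klasses : List String) (out : List (String × Option String)) : Decidable (Spec_tuples_generator tutors klasses out) := by unfold Spec_tuples_generator; infer_instance

-- ===== CLAIM (what is proved, stated in full; the proofs are below) =====
def Claim_equal_tuples_generator : Prop := ∀ (tutors : List String) (klasses : List String), Dom_tuples_generator tutors klasses → Spec_tuples_generator tutors klasses (tuples_generator tutors klasses)

-- ===== LEMMAS AND PROOFS =====

theorem padded_length_ge (tutors klasses : List String) :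
    tutors.length ≤ (klasses.map some ++ List.replicate (tutors.length - klasses.length) (none : Option String)).length := by
  simp; omega

theorem tuples_generator_go_eq (tutors klasses : List String) :
    ∀ (rest : List String) (n : Nat), n + rest.length = tutors.length →
      tuples_generator_go tutors klasses (n : Int) rest =
        (tutors.zip (klasses.map some ++ List.replicate (tutors.length - klasses.length) none)).drop n := by
  intro rest
  induction rest with
  | nil =>
      intro n hn
      have hlen := List.length_zip (l₁ := tutors)
        (l₂ := klasses.map some ++ List.replicate (tutors.length - klasses.length) (none : Option String))
      rw [tuples_generator_go, eq_comm, List.drop_eq_nil_iff]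
      simp at hlen hn ⊢
      omega
  | cons a r ih =>
      intro n hn
      simp only [List.length_cons] at hn
      have hnt : n < tutors.length := by omega
      have hplen := padded_length_ge tutors klasses
      have hzlen : n < (tutors.zip (klasses.map some ++ List.replicate (tutors.length - klasses.length) (none : Option String))).length := by
        rw [List.length_zip]; omega
      rw [tuples_generator_go, List.drop_eq_getElem_cons hzlen]
      have hstep : tuples_generator_go tutors klasses ((n : Int) + 1) r =
          (tutors.zip (klasses.map some ++ List.replicate (tutors.length - klasses.length) none)).drop (n + 1) := by
        have := ih (n + 1) (by omega)
        push_cast at this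
        exact this
      rw [hstep]
      congr 1
      have htut : (PySem.List.pyGet? tutors (n : Int)).getD "" = tutors[n] := by
        rw [PySem.List.pyGet?_natCast, List.getElem?_eq_getElem hnt]; rfl
      have hget : (tutors.zip (klasses.map some ++ List.replicate (tutors.length - klasses.length) (none : Option String)))[n] =
          (tutors[n], (klasses.map some ++ List.replicate (tutors.length - klasses.length) (none : Option String))[n]'(by omega)) := by
        simp [List.getElem_zip]
      rw [hget]
      by_cases hk : n < klasses.length
      · have hcond : ¬ ((n : Int) > (klasses.length : Int) - 1) := by omega
        simp only [hcond, if_false, htut]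
        rw [PySem.List.pyGet?_natCast, List.getElem?_eq_getElem hk]
        congr 1
        rw [List.getElem_append_left (by simpa using hk)]
        simp
      · have hcond : (n : Int) > (klasses.length : Int) - 1 := by omega
        simp only [hcond, if_true, htut]
        congr 1
        rw [List.getElem_append_right (by simpa using hk)]
        simp

-- ===== VERDICT (by name: the statement is the Claim_ definition above) =====
theorem tuples_generator_spec : Claim_equal_tuples_generator := by
  intro tutors klasses _
  show tuples_generator tutors klasses = tuples_generator_alt tutors klasses
  have h := tuples_generator_go_eq tutors klasses tutors 0 (by simp)
  simpa [tuples_generator, tuples_generator_alt] using h
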